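-- pv_equiv track=rewrite | github.com/xuqinyongxiansheng/kairos-system | src/kairos/system/knowledge_distillation.py | _generalize_content
-- ===== SOURCE A (Python) =====
-- def _generalize_content(content: str) -> str:
--     """泛化内容"""
--     generalized = content
--
--     specific_patterns = {
--         'python': '编程语言',
--         'javascript': '编程语言',
--         'java': '编程语言',
--         'mysql': '数据库',
--         'postgresql': '数据库',
--         'mongodb': '数据库',
--         'windows': '操作系统',
--         'linux': '操作系统',
--         'macos': '操作系统'
--     }
--
--     for specific, general in specific_patterns.items():
--         generalized = generalized.replace(specific, general)
--
--     return generalized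
-- ===== SOURCE B (Python) =====
-- def _generalize_content(content: str) -> str:
--     """泛化内容 — single left-to-right scan instead of nine sequential full-string replace passes"""
--     rules = [
--         ('python', '编程语言'),
--         ('javascript', '编程语言'),  # must precede 'java'
--         ('java', '编程语言'),
--         ('mysql', '数据库'),
--         ('postgresql', '数据库'),
--         ('mongodb', '数据库'),
--         ('windows', '操作系统'),
--         ('linux', '操作系统'),
--         ('macos', '操作系统'),
--     ]
--     out = []
--     i = 0
--     n = len(content)
--     while i < n:
--         for term, category in rules:
--             if content.startswith(term, i):
--                 out.append(category)
--                 i += len(term)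
--                 break
--         else:
--             out.append(content[i])
--             i += 1
--     return ''.join(out)
-- ===== Notes on version B (the rewrite author's own statement) =====
-- stated objective: alternative
-- what changed: Replaces nine sequential full-string .replace passes by a single left-to-right scan that tries the patterns (in dict order, so 'javascript' before 'java') at each position and emits the category or the current character.
import Mathlib
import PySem

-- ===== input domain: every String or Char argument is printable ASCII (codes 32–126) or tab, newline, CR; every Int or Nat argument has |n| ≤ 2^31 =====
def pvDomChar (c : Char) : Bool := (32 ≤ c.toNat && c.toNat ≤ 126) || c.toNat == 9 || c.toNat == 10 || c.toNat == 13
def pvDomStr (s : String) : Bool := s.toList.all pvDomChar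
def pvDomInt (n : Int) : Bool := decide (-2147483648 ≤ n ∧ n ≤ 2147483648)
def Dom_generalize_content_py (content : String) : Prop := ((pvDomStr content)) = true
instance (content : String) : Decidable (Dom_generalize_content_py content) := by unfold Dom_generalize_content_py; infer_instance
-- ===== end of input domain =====

/- B replaces A's nine sequential full-string replace passes with one left-to-right scan that
   tries the patterns (dict order, 'javascript' before 'java') at each position; same result. -/


-- ===== PORT A =====
def generalize_content_py (content : String) : String :=
  let specific_patterns : PySem.Dict String String := PySem.Dict.mk
    [("python", "编程语言"), ("javascript", "编程语言"), ("java", "编程语言"),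
     ("mysql", "数据库"), ("postgresql", "数据库"), ("mongodb", "数据库"),
     ("windows", "操作系统"), ("linux", "操作系统"), ("macos", "操作系统")]
  specific_patterns.items.foldl (fun generalized pr => PySem.Str.replace generalized pr.1 pr.2) content

-- ===== PORT B =====
-- the same mapping, as (pattern, category) pairs over chars, in dict order ('javascript' before 'java')
def pvPats : List (List Char × List Char) :=
  [(['p','y','t','h','o','n'], ['编','程','语','言']),
   (['j','a','v','a','s','c','r','i','p','t'], ['编','程','语','言']),
   (['j','a','v','a'], ['编','程','语','言']),
   (['m','y','s','q','l'], ['数','据','库']),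
   (['p','o','s','t','g','r','e','s','q','l'], ['数','据','库']),
   (['m','o','n','g','o','d','b'], ['数','据','库']),
   (['w','i','n','d','o','w','s'], ['操','作','系','统']),
   (['l','i','n','u','x'], ['操','作','系','统']),
   (['m','a','c','o','s'], ['操','作','系','统'])]

-- the inner `for k in keys: if content.startswith(k, i)` loop: first pattern matching here
def pvFindPat (s : List Char) : Option (List Char × List Char) :=
  pvPats.find? (fun pr => pr.1.isPrefixOf s)

-- the `while i < n` loop; fuel bounds the number of iterations (each consumes ≥ 1 char)
def pvScan : Nat → List Char → List Char
  | 0, _ => []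
  | _ + 1, [] => []
  | fuel + 1, c :: t =>
    match pvFindPat (c :: t) with
    | some (p, r) => r ++ pvScan fuel (List.drop p.length (c :: t))
    | none => c :: pvScan fuel t

def generalize_content_py_alt (content : String) : String :=
  String.ofList (pvScan content.toList.length content.toList)

-- ===== PRECONDITION & SPEC =====
def Spec_generalize_content_py (content : String) (out : String) : Prop := out = generalize_content_py_alt content
instance (content : String) (out : String) : Decidable (Spec_generalize_content_py content out) := by unfold Spec_generalize_content_py; infer_instance

-- ===== CLAIM (what is proved, stated in full; the proofs are below) =====
def Claim_equal_generalize_content_py : Prop := ∀ (content : String), Dom_generalize_content_py content → Spec_generalize_content_py content (generalize_content_py content)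

-- ===== LEMMAS AND PROOFS =====

-- A's fold of replaces, at the char-list level
def pvFoldRep (L : List (List Char × List Char)) (s : List Char) : List Char :=
  L.foldl (fun g pr => PySem.Chars.replace g pr.1 pr.2) s

-- patterns nonempty and ASCII; replacements nonempty and non-ASCII
def pvGoodL (L : List (List Char × List Char)) : Prop :=
  ∀ pr ∈ L, pr.1 ≠ [] ∧ pr.2 ≠ [] ∧ (∀ c ∈ pr.1, c.toNat ≤ 127) ∧ (∀ c ∈ pr.2, 128 ≤ c.toNat)

-- no overlap between an earlier pattern q and a proper suffix of a first-matching pattern u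
def pvCrossOK (q u : List Char) : Prop :=
  ∀ k < u.length, 0 < k → q.isPrefixOf (u.drop k) = false ∧ (u.drop k).isPrefixOf q = false

theorem pvGood_pats : pvGoodL pvPats := by
  unfold pvGoodL pvPats; simp

set_option maxRecDepth 10000 in
theorem pvCross_pats : ∀ j < pvPats.length, ∀ i < j,
    pvCrossOK (pvPats.getD i ([], [])).1 (pvPats.getD j ([], [])).1 := by
  unfold pvCrossOK; decide

theorem pvGoodL_mono (L L' : List (List Char × List Char))
    (hsub : ∀ x ∈ L', x ∈ L) (hG : pvGoodL L) : pvGoodL L' :=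
  fun pr hpr => ⟨(hG pr (hsub _ hpr)).1, (hG pr (hsub _ hpr)).2.1,
    (hG pr (hsub _ hpr)).2.2.1, (hG pr (hsub _ hpr)).2.2.2⟩

-- go unfolding equations
theorem pv_go_zero (old new l acc : List Char) :
    PySem.Chars.replace.go old new 0 l acc = acc.reverse ++ l := rfl

theorem pv_go_nil (old new : List Char) (n : Nat) (acc : List Char) :
    PySem.Chars.replace.go old new (n + 1) [] acc = acc.reverse := rfl

theorem pv_go_cons (old new : List Char) (n : Nat) (c : Char) (t acc : List Char) :
    PySem.Chars.replace.go old new (n + 1) (c :: t) acc =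
      if old.isPrefixOf (c :: t) then
        PySem.Chars.replace.go old new n (List.drop old.length (c :: t)) (new.reverse ++ acc)
      else PySem.Chars.replace.go old new n t (c :: acc) := rfl

theorem pv_go_acc (old new : List Char) (fuel : Nat) :
    ∀ (l acc : List Char), PySem.Chars.replace.go old new fuel l acc
      = acc.reverse ++ PySem.Chars.replace.go old new fuel l [] := by
  induction fuel with
  | zero => intro l acc; rw [pv_go_zero, pv_go_zero]; simp
  | succ n ih =>
    intro l acc
    cases l with
    | nil => rw [pv_go_nil, pv_go_nil]; simp
    | cons c t =>
      rw [pv_go_cons, pv_go_cons]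
      by_cases h : old.isPrefixOf (c :: t)
      · rw [if_pos h, if_pos h, ih _ (new.reverse ++ acc), ih _ (new.reverse ++ [])]
        simp
      · rw [if_neg h, if_neg h, ih _ (c :: acc), ih _ [c]]
        simp

theorem pv_go_fuel (old new : List Char) (hne : old ≠ []) :
    ∀ (fuel : Nat) (l : List Char), l.length ≤ fuel →
      PySem.Chars.replace.go old new fuel l [] = PySem.Chars.replace.go old new l.length l [] := by
  intro fuel
  induction fuel using Nat.strong_induction_on with
  | _ fuel ih =>
    intro l h
    cases fuel with
    | zero =>
      have : l = [] := List.eq_nil_of_length_eq_zero (Nat.le_zero.mp h)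
      subst this; rfl
    | succ n =>
      cases l with
      | nil => rw [pv_go_nil]; rfl
      | cons c t =>
        have h1 : t.length ≤ n := by simpa using h
        have holen : 0 < old.length := List.length_pos_of_ne_nil hne
        rw [show (c :: t).length = t.length + 1 from rfl, pv_go_cons, pv_go_cons]
        by_cases hp : old.isPrefixOf (c :: t)
        · rw [if_pos hp, if_pos hp,
            pv_go_acc old new n (List.drop old.length (c :: t)) (new.reverse ++ []),
            pv_go_acc old new t.length (List.drop old.length (c :: t)) (new.reverse ++ [])]
          congr 1
          have hd : (List.drop old.length (c :: t)).length ≤ t.length := by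
            simp only [List.length_drop, List.length_cons]; omega
          rw [ih n (by omega) _ (hd.trans h1), ih t.length (by omega) _ hd]
        · rw [if_neg hp, if_neg hp,
            pv_go_acc old new n t [c], pv_go_acc old new t.length t [c]]
          congr 1
          rw [ih n (by omega) t h1]

theorem pv_replace_go (s old new : List Char) (hne : old ≠ []) :
    PySem.Chars.replace s old new = PySem.Chars.replace.go old new s.length s [] := by
  cases old with
  | nil => exact absurd rfl hne
  | cons o ot => rfl

theorem pv_replace_nil (old new : List Char) (hne : old ≠ []) :
    PySem.Chars.replace [] old new = [] := by
  rw [pv_replace_go _ _ _ hne]; rfl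

theorem pv_replace_cons (old new : List Char) (c : Char) (u : List Char)
    (h : ¬ old <+: (c :: u)) (hne : old ≠ []) :
    PySem.Chars.replace (c :: u) old new = c :: PySem.Chars.replace u old new := by
  rw [pv_replace_go _ _ _ hne, pv_replace_go _ _ _ hne]
  rw [show (c :: u).length = u.length + 1 from rfl, pv_go_cons,
    if_neg (by simpa [List.isPrefixOf_iff_prefix] using h), pv_go_acc]
  simp

theorem pv_replace_head (old new X : List Char) (hne : old ≠ []) :
    PySem.Chars.replace (old ++ X) old new = new ++ PySem.Chars.replace X old new := by
  rw [pv_replace_go _ _ _ hne, pv_replace_go _ _ _ hne]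
  cases old with
  | nil => exact absurd rfl hne
  | cons o ot =>
    have hlen : ((o :: ot) ++ X).length = (ot.length + X.length) + 1 := by simp
    rw [hlen, List.cons_append, pv_go_cons,
      if_pos (by rw [List.isPrefixOf_iff_prefix, ← List.cons_append]; exact List.prefix_append _ _)]
    have hdrop : List.drop (o :: ot).length (o :: (ot ++ X)) = X := by
      rw [← List.cons_append]; exact List.drop_left
    rw [hdrop, pv_go_acc]
    simp only [List.reverse_reverse, List.append_nil]
    congr 1
    rw [pv_go_fuel _ _ hne _ _ (by omega)]

theorem pv_prefix_replace (old new : List Char) (hne : old ≠ [])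
    (hnew : new ≠ []) (hhi : ∀ c ∈ new, 128 ≤ c.toNat) :
    ∀ (u q : List Char), (∀ c ∈ q, c.toNat ≤ 127) →
      q <+: PySem.Chars.replace u old new → q <+: u := by
  intro u
  induction u with
  | nil => intro q _ h; rwa [pv_replace_nil _ _ hne] at h
  | cons c t ih =>
    intro q hlo h
    by_cases hp : old <+: (c :: t)
    · obtain ⟨X, hX⟩ := hp
      rw [← hX, pv_replace_head _ _ _ hne] at h
      cases q with
      | nil => exact List.nil_prefix
      | cons d q' =>
        exfalso
        cases new with
        | nil => exact hnew rfl
        | cons n0 nt =>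
          have hdn : d = n0 := (List.cons_prefix_cons.mp (by simpa using h)).1
          have h1 := hlo d (List.mem_cons_self)
          have h2 := hhi n0 (List.mem_cons_self)
          rw [hdn] at h1
          omega
    · rw [pv_replace_cons _ _ _ _ hp hne] at h
      cases q with
      | nil => exact List.nil_prefix
      | cons d q' =>
        obtain ⟨hd, hq'⟩ := List.cons_prefix_cons.mp h
        exact List.cons_prefix_cons.mpr
          ⟨hd, ih q' (fun x hm => hlo x (List.mem_cons_of_mem _ hm)) hq'⟩

theorem pv_replace_append (old new : List Char) (hne : old ≠ []) :
    ∀ (u X : List Char), (∀ k < u.length, ¬ old <+: (u ++ X).drop k) →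
      PySem.Chars.replace (u ++ X) old new = u ++ PySem.Chars.replace X old new := by
  intro u
  induction u with
  | nil => intro X _; simp
  | cons c u' ih =>
    intro X h
    have h0 : ¬ old <+: (c :: (u' ++ X)) := by simpa using h 0 (by simp)
    rw [List.cons_append, pv_replace_cons _ _ _ _ h0 hne,
      ih X (fun k hk => by simpa using h (k + 1) (by simp; omega))]
    simp

theorem pv_fold_push :
    ∀ (L : List (List Char × List Char)) (u X : List Char),
      pvGoodL L →
      (∀ pr ∈ L, ¬ pr.1 <+: (u ++ X) ∧ pvCrossOK pr.1 u) →
      pvFoldRep L (u ++ X) = u ++ pvFoldRep L X := by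
  intro L
  induction L with
  | nil => intro u X _ _; simp [pvFoldRep]
  | cons pr rest ih =>
    intro u X hL h
    have hpr := hL pr (List.mem_cons_self)
    have hpr2 := h pr (List.mem_cons_self)
    have hstep : PySem.Chars.replace (u ++ X) pr.1 pr.2 = u ++ PySem.Chars.replace X pr.1 pr.2 := by
      apply pv_replace_append _ _ hpr.1
      intro k hk
      rcases Nat.eq_zero_or_pos k with rfl | hkpos
      · simpa using hpr2.1
      · rw [List.drop_append_of_le_length (le_of_lt hk)]
        intro hpre
        have hcr := hpr2.2 k hk hkpos
        rcases List.prefix_or_prefix_of_prefix hpre (List.prefix_append _ _) with h1 | h1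
        · exact absurd (List.isPrefixOf_iff_prefix.mpr h1) (by simp [hcr.1])
        · exact absurd (List.isPrefixOf_iff_prefix.mpr h1) (by simp [hcr.2])
    have hGrest : pvGoodL rest := pvGoodL_mono _ _ (fun x hx => List.mem_cons_of_mem _ hx) hL
    have hrest : ∀ p ∈ rest, ¬ p.1 <+: (u ++ PySem.Chars.replace X pr.1 pr.2) ∧ pvCrossOK p.1 u := by
      intro p hp
      refine ⟨?_, (h p (List.mem_cons_of_mem _ hp)).2⟩
      intro hpre
      apply (h p (List.mem_cons_of_mem _ hp)).1
      exact pv_prefix_replace pr.1 pr.2 hpr.1 hpr.2.1 hpr.2.2.2 (u ++ X) p.1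
        (hL p (List.mem_cons_of_mem _ hp)).2.2.1 (hstep ▸ hpre)
    calc pvFoldRep (pr :: rest) (u ++ X)
        = pvFoldRep rest (PySem.Chars.replace (u ++ X) pr.1 pr.2) := by
          simp [pvFoldRep, List.foldl_cons]
      _ = pvFoldRep rest (u ++ PySem.Chars.replace X pr.1 pr.2) := by rw [hstep]
      _ = u ++ pvFoldRep rest (PySem.Chars.replace X pr.1 pr.2) := ih _ _ hGrest hrest
      _ = u ++ pvFoldRep (pr :: rest) X := by simp [pvFoldRep, List.foldl_cons]

theorem pv_fold_push_cn :
    ∀ (L : List (List Char × List Char)) (u X : List Char),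
      (∀ pr ∈ L, pr.1 ≠ []) →
      (∀ pr ∈ L, ∀ c ∈ pr.1, c.toNat ≤ 127) →
      (∀ c ∈ u, 128 ≤ c.toNat) →
      pvFoldRep L (u ++ X) = u ++ pvFoldRep L X := by
  intro L
  induction L with
  | nil => intro u X _ _ _; simp [pvFoldRep]
  | cons pr rest ih =>
    intro u X hne hlo hu
    have hpne := hne pr (List.mem_cons_self)
    have hstep : PySem.Chars.replace (u ++ X) pr.1 pr.2 = u ++ PySem.Chars.replace X pr.1 pr.2 := by
      apply pv_replace_append _ _ hpne
      intro k hk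
      rw [List.drop_append_of_le_length (le_of_lt hk)]
      intro hpre
      obtain ⟨e, w, hew⟩ := List.exists_cons_of_ne_nil
        (show u.drop k ≠ [] by
          intro hnil
          have := congrArg List.length hnil
          simp only [List.length_drop, List.length_nil] at this
          omega)
      cases hO : pr.1 with
      | nil => exact hpne hO
      | cons a ot =>
        rw [hO, hew, List.cons_append] at hpre
        have ha : a = e := (List.cons_prefix_cons.mp hpre).1
        have he : e ∈ u := List.drop_subset k u (hew ▸ List.mem_cons_self)
        have h1 := hlo pr (List.mem_cons_self) a (hO ▸ List.mem_cons_self)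
        have h2 := hu e he
        rw [ha] at h1
        omega
    calc pvFoldRep (pr :: rest) (u ++ X)
        = pvFoldRep rest (PySem.Chars.replace (u ++ X) pr.1 pr.2) := by
          simp [pvFoldRep, List.foldl_cons]
      _ = pvFoldRep rest (u ++ PySem.Chars.replace X pr.1 pr.2) := by rw [hstep]
      _ = u ++ pvFoldRep rest (PySem.Chars.replace X pr.1 pr.2) :=
          ih _ _ (fun p hp => hne p (List.mem_cons_of_mem _ hp))
            (fun p hp => hlo p (List.mem_cons_of_mem _ hp)) hu
      _ = u ++ pvFoldRep (pr :: rest) X := by simp [pvFoldRep, List.foldl_cons]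

theorem pv_fold_cons (L : List (List Char × List Char)) (c : Char) (t : List Char)
    (hL : pvGoodL L) (h : ∀ pr ∈ L, ¬ pr.1 <+: (c :: t)) :
    pvFoldRep L (c :: t) = c :: pvFoldRep L t := by
  have := pv_fold_push L [c] t hL (fun pr hpr =>
    ⟨by simpa using h pr hpr, fun k hk hkpos => by simp at hk; omega⟩)
  simpa using this

theorem pv_fold_nil (L : List (List Char × List Char)) (hL : ∀ pr ∈ L, pr.1 ≠ []) :
    pvFoldRep L [] = [] := by
  induction L with
  | nil => rfl
  | cons pr rest ih =>
    have : pvFoldRep (pr :: rest) [] = pvFoldRep rest (PySem.Chars.replace [] pr.1 pr.2) := by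
      simp [pvFoldRep, List.foldl_cons]
    rw [this, pv_replace_nil _ _ (hL pr (List.mem_cons_self))]
    exact ih (fun p hp => hL p (List.mem_cons_of_mem _ hp))

theorem pv_find?_split {α : Type} (f : α → Bool) :
    ∀ (L : List α) (x : α), L.find? f = some x →
      ∃ L1 L2, L = L1 ++ x :: L2 ∧ (∀ y ∈ L1, f y = false) ∧ f x = true := by
  intro L
  induction L with
  | nil => intro x h; simp [List.find?] at h
  | cons a rest ih =>
    intro x h
    by_cases hfa : f a
    · rw [List.find?_cons_of_pos hfa] at h
      exact ⟨[], rest, by simp [← Option.some_inj.mp h], by simp, Option.some_inj.mp h ▸ hfa⟩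
    · rw [List.find?_cons_of_neg hfa] at h
      obtain ⟨L1, L2, hsplit, hfalse, hx⟩ := ih x h
      exact ⟨a :: L1, L2, by simp [hsplit], by
        intro y hy
        rcases List.mem_cons.mp hy with rfl | hy'
        · simpa using hfa
        · exact hfalse y hy', hx⟩

theorem pv_main : ∀ (n : Nat) (s : List Char), s.length ≤ n →
    pvFoldRep pvPats s = pvScan n s := by
  intro n
  induction n with
  | zero =>
    intro s h
    have : s = [] := List.eq_nil_of_length_eq_zero (Nat.le_zero.mp h)
    subst this
    rw [pv_fold_nil _ (fun pr hpr => (pvGood_pats pr hpr).1)]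
    rfl
  | succ n ih =>
    intro s h
    cases s with
    | nil =>
      rw [pv_fold_nil _ (fun pr hpr => (pvGood_pats pr hpr).1)]
      rfl
    | cons c t =>
      cases hfp : pvFindPat (c :: t) with
      | none =>
        have hnone : ∀ pr ∈ pvPats, ¬ pr.1 <+: (c :: t) := by
          intro pr hpr hh
          exact List.find?_eq_none.mp hfp pr hpr (List.isPrefixOf_iff_prefix.mpr hh)
        rw [pv_fold_cons _ _ _ pvGood_pats hnone, ih t (by simpa using h)]
        simp only [pvScan, hfp]
      | some pr0 =>
        obtain ⟨p, r⟩ := pr0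
        obtain ⟨L1, L2, hsplit, hL1false, hpx⟩ := pv_find?_split _ pvPats (p, r) hfp
        have hmemL1 : ∀ y ∈ L1, y ∈ pvPats := by
          intro y hy; rw [hsplit]; exact List.mem_append_left _ hy
        have hmemL2 : ∀ y ∈ L2, y ∈ pvPats := by
          intro y hy; rw [hsplit]
          exact List.mem_append_right _ (List.mem_cons_of_mem _ hy)
        have hmemP : (p, r) ∈ pvPats := by
          rw [hsplit]; exact List.mem_append_right _ (List.mem_cons_self)
        have hp_ne : p ≠ [] := (pvGood_pats (p, r) hmemP).1
        have hplen : 0 < p.length := List.length_pos_of_ne_nil hp_ne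
        obtain ⟨X, hX⟩ : ∃ X, p ++ X = c :: t := List.isPrefixOf_iff_prefix.mp hpx
        -- cross facts for earlier patterns
        have hcross : ∀ q ∈ L1, pvCrossOK q.1 p := by
          intro q hq
          obtain ⟨i, hi, hqi⟩ := List.mem_iff_getElem.mp hq
          have hj : L1.length < pvPats.length := by rw [hsplit]; simp
          have hgetj : pvPats.getD L1.length ([], []) = (p, r) := by
            rw [hsplit, List.getD_eq_getElem?_getD, List.getElem?_append_right le_rfl]
            simp
          have hgeti : pvPats.getD i ([], []) = q := by
            rw [hsplit, List.getD_eq_getElem?_getD, List.getElem?_append_left hi,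
              List.getElem?_eq_getElem hi]
            simp [hqi]
          have := pvCross_pats L1.length hj i hi
          rwa [hgetj, hgeti] at this
        have hsplitfold : ∀ s0, pvFoldRep pvPats s0
            = pvFoldRep L2 (PySem.Chars.replace (pvFoldRep L1 s0) p r) := by
          intro s0
          rw [hsplit]
          simp [pvFoldRep, List.foldl_append, List.foldl_cons]
        have hL1good : pvGoodL L1 := pvGoodL_mono _ _ hmemL1 pvGood_pats
        have hfold1 : pvFoldRep L1 (p ++ X) = p ++ pvFoldRep L1 X := by
          apply pv_fold_push L1 p X hL1good
          intro q hq
          refine ⟨?_, hcross q hq⟩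
          rw [hX]
          intro hh
          have h2 := List.isPrefixOf_iff_prefix.mpr hh
          rw [hL1false q hq] at h2
          simp at h2
        have hXlen : X.length ≤ n := by
          have := congrArg List.length hX
          simp only [List.length_append, List.length_cons] at this
          simp only [List.length_cons] at h
          omega
        have hcalc : pvFoldRep pvPats (c :: t) = r ++ pvScan n X := by
          calc pvFoldRep pvPats (c :: t)
              = pvFoldRep L2 (PySem.Chars.replace (pvFoldRep L1 (c :: t)) p r) := hsplitfold _
            _ = pvFoldRep L2 (PySem.Chars.replace (p ++ pvFoldRep L1 X) p r) := by
                rw [← hX, hfold1]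
            _ = pvFoldRep L2 (r ++ PySem.Chars.replace (pvFoldRep L1 X) p r) := by
                rw [pv_replace_head _ _ _ hp_ne]
            _ = r ++ pvFoldRep L2 (PySem.Chars.replace (pvFoldRep L1 X) p r) :=
                pv_fold_push_cn L2 r _
                  (fun pr hpr => (pvGood_pats pr (hmemL2 pr hpr)).1)
                  (fun pr hpr => (pvGood_pats pr (hmemL2 pr hpr)).2.2.1)
                  (pvGood_pats (p, r) hmemP).2.2.2
            _ = r ++ pvFoldRep pvPats X := by rw [← hsplitfold X]
            _ = r ++ pvScan n X := by rw [ih X hXlen]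
        rw [hcalc]
        have hdrop : List.drop p.length (c :: t) = X := by rw [← hX, List.drop_left]
        simp only [pvScan, hfp, hdrop]

-- bridge: A's String-level fold equals the char-level fold
theorem pv_fold_strings : ∀ (L : List (String × String)) (s : String),
    L.foldl (fun g pr => PySem.Str.replace g pr.1 pr.2) s
      = String.ofList (pvFoldRep (L.map (fun pr => (pr.1.toList, pr.2.toList))) s.toList) := by
  intro L
  induction L with
  | nil => intro s; simp [pvFoldRep, String.ofList_toList]
  | cons pr rest ih =>
    intro s
    rw [List.foldl_cons, ih (PySem.Str.replace s pr.1 pr.2)]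
    simp [pvFoldRep, List.foldl_cons, PySem.Str.toList_replace]

theorem pvPortA_eq (content : String) :
    generalize_content_py content = String.ofList (pvFoldRep pvPats content.toList) := by
  unfold generalize_content_py
  rw [pv_fold_strings]
  rfl

-- ===== VERDICT (by name: the statement is the Claim_ definition above) =====
theorem generalize_content_py_spec : Claim_equal_generalize_content_py := by
  intro content _
  unfold Spec_generalize_content_py generalize_content_py_alt
  rw [pvPortA_eq, pv_main content.toList.length content.toList le_rfl]
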